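-- pv_equiv track=rewrite | github.com/deepomicslab/LocalHGT | paper_results/mechanism.py | extract_homology
-- ===== SOURCE A (Python) =====
-- def extract_homology(alignment):
--     homology_list = []
--
--     homology_flag = False
--     homology_seq = ''
--     for i in range(len(alignment[0])):
--         if str(alignment[0][i]) != "-" and str(alignment[1][i]) != "-":
--             # print (i, alignment[0][i], alignment[1][i])
--             if homology_flag == False:
--                 homology_flag = True
--                 homology_seq += str(alignment[0][i])
--             else:
--                 homology_seq += str(alignment[0][i])
--         else:
--             if len(homology_seq) > 0:
--                 homology_list.append(homology_seq)
--             homology_flag = False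
--             homology_seq = ''
--     if len(homology_seq) > 0:
--         homology_list.append(homology_seq)
--     homology_len_list = [len(x) for x in homology_list]
--     # if len(homology_len_list) > 0 and max(homology_len_list) > 20:
--     #     print (homology_list)
--     #     print (alignment)
--     # print (homology_list)
--     # return homology_list
--     if len(homology_len_list) > 0:
--         return max(homology_len_list)
--     else:
--         return 0
-- ===== SOURCE B (Python) =====
-- def extract_homology(alignment):
--     mask = ''.join('1' if str(alignment[0][i]) != '-' and str(alignment[1][i]) != '-' else '0'
--                    for i in range(len(alignment[0])))
--     return max((len(run) for run in mask.split('0')), default=0)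
-- ===== Notes on version B (the rewrite author's own statement) =====
-- stated objective: idiomatic
-- what changed: Replaces the explicit homology_flag/homology_seq/homology_list state machine with building a '1'/'0' no-gap mask string, splitting it on '0' and returning the longest piece's length.
import Mathlib
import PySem

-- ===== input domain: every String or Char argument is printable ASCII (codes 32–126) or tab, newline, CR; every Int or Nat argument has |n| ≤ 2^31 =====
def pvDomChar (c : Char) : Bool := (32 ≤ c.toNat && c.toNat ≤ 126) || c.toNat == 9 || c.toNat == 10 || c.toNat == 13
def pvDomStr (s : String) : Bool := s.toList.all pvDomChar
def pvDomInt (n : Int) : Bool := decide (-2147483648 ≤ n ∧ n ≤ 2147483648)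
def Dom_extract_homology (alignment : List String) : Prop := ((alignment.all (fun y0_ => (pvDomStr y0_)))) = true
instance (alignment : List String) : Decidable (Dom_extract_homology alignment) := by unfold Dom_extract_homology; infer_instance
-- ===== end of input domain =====

-- B replaces A's homology_flag/homology_seq/homology_list state machine by building a
-- '1'/'0' no-gap mask and returning the longest '1'-run via split('0'); same cost, more idiomatic.


-- ===== PORT A =====
-- one loop iteration of A: branch on "both columns are not '-'", growing homology_seq or
-- flushing it into homology_list; state = (homology_list, homology_flag, homology_seq)
def ehStep (a0 a1 : List Char) (st : List (List Char) × Bool × List Char) (i : Int) :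
    List (List Char) × Bool × List Char :=
  if PySem.List.pyGetD a0 i ' ' ≠ '-' ∧ PySem.List.pyGetD a1 i ' ' ≠ '-' then
    if st.2.1 = false then (st.1, true, st.2.2 ++ [PySem.List.pyGetD a0 i ' '])
    else (st.1, st.2.1, st.2.2 ++ [PySem.List.pyGetD a0 i ' '])
  else
    ((if st.2.2.length > 0 then st.1 ++ [st.2.2] else st.1), false, ([] : List Char))

def extract_homology (alignment : List String) : Int :=
  let a0 := ((PySem.List.pyGet? alignment 0).getD "").toList
  let a1 := ((PySem.List.pyGet? alignment 1).getD "").toList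
  let st := (PySem.List.pyRange 0 (a0.length : Int) 1).foldl (ehStep a0 a1) ([], false, [])
  let hl := if st.2.2.length > 0 then st.1 ++ [st.2.2] else st.1
  let hll := hl.map (fun x => (x.length : Int))
  if hll.length > 0 then (PySem.List.max? hll (fun x => x)).getD 0 else 0

-- ===== PORT B =====
-- the '1'/'0' no-gap mask over the columns of alignment[0]
def ehMask (a0 a1 : List Char) : List Char :=
  (PySem.List.pyRange 0 (a0.length : Int) 1).map
    (fun i => if PySem.List.pyGetD a0 i ' ' ≠ '-' ∧ PySem.List.pyGetD a1 i ' ' ≠ '-' then '1' else '0')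

def extract_homology_alt (alignment : List String) : Int :=
  let a0 := ((PySem.List.pyGet? alignment 0).getD "").toList
  let a1 := ((PySem.List.pyGet? alignment 1).getD "").toList
  let runs := PySem.Chars.splitOn (ehMask a0 a1) ['0']
  PySem.List.maxD (runs.map (fun r => (r.length : Int))) (fun x => x) 0

-- ===== PRECONDITION & SPEC =====
-- Pre_ excludes exactly the inputs on which Python A raises an IndexError: an empty alignment
-- list, or a column where alignment[0] has no gap while alignment[1] is missing or too short
-- (the 'and' short-circuits, so alignment[1][i] is only read when alignment[0][i] != '-').
def Pre_extract_homology (alignment : List String) : Prop :=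
  alignment ≠ [] ∧
  ∀ i < ((alignment.getD 0 "").toList).length,
    ((alignment.getD 0 "").toList).getD i ' ' = '-' ∨
      (2 ≤ alignment.length ∧ i < ((alignment.getD 1 "").toList).length)
instance (alignment : List String) : Decidable (Pre_extract_homology alignment) := by
  unfold Pre_extract_homology; infer_instance
def pvWitness_extract_homology : List String := ["AB-A", "A-CA"]
def Spec_extract_homology (alignment : List String) (out : Int) : Prop := out = extract_homology_alt alignment
instance (alignment : List String) (out : Int) : Decidable (Spec_extract_homology alignment out) := by unfold Spec_extract_homology; infer_instance

-- ===== CLAIM (what is proved, stated in full; the proofs are below) =====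
def Claim_equal_extract_homology : Prop := ∀ (alignment : List String), Dom_extract_homology alignment → Pre_extract_homology alignment → Spec_extract_homology alignment (extract_homology alignment)

-- ===== LEMMAS AND PROOFS =====

-- proof-side abstractions: only run LENGTHS matter for the answer
def maxN (ns : List Nat) : Nat := ns.foldl max 0

-- longest '1'-run of a mask, given the current run length cur
def mrun : List Char → Nat → Nat
  | [], cur => cur
  | c :: t, cur => if c = '0' then max cur (mrun t 0) else mrun t (cur + 1)

-- structural (fuel-free) form of PySem.Chars.splitOn.go on the one-char separator '0'
def runsSplit : List Char → List Char → List (List Char) → List (List Char)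
  | [], cur, acc => (cur.reverse :: acc).reverse
  | c :: t, cur, acc =>
      if c = '0' then runsSplit t [] (cur.reverse :: acc) else runsSplit t (c :: cur) acc

-- A's loop step abstracted to lengths, driven by the mask character
def stepN (st : List Nat × Nat) (c : Char) : List Nat × Nat :=
  if c = '0' then ((if st.2 > 0 then st.1 ++ [st.2] else st.1), 0) else (st.1, st.2 + 1)

-- max(list of Nats cast to Int) with default 0
def mival (ns : List Nat) : Int :=
  (PySem.List.max? (ns.map (fun (n : Nat) => (n : Int))) (fun x => x)).getD 0

-- A's post-loop computation, on the length abstraction of its final state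
def finalN (st : List Nat × Nat) : Int :=
  let hll := if st.2 > 0 then st.1 ++ [st.2] else st.1
  if hll.length > 0 then mival hll else 0

lemma foldl_max_eq (ns : List Nat) : ∀ m, ns.foldl max m = max m (maxN ns) := by
  induction ns with
  | nil => simp [maxN]
  | cons c t ih =>
      intro m
      rw [List.foldl_cons, ih (max m c), show maxN (c :: t) = List.foldl max c t from by
        simp [maxN, List.foldl_cons], ih c]
      omega

lemma maxN_snoc (ns : List Nat) (c : Nat) : maxN (ns ++ [c]) = max (maxN ns) c := by
  unfold maxN; rw [List.foldl_append, List.foldl_cons, List.foldl_nil, foldl_max_eq]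

lemma maxN_cons (c : Nat) (ns : List Nat) : maxN (c :: ns) = max c (maxN ns) := by
  unfold maxN; rw [List.foldl_cons, foldl_max_eq]; unfold maxN; omega

lemma maxN_reverse (ns : List Nat) : maxN ns.reverse = maxN ns := by
  induction ns with
  | nil => rfl
  | cons c t ih => rw [List.reverse_cons, maxN_snoc, ih, maxN_cons]; omega

lemma foldl_max_cast : ∀ (t : List Nat) (m : Nat),
    (t.map (fun (n : Nat) => (n : Int))).foldl max ((m : Nat) : Int) = ((t.foldl max m : Nat) : Int) := by
  intro t
  induction t with
  | nil => intro m; rfl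
  | cons c t ih =>
      intro m
      simp only [List.map_cons, List.foldl_cons]
      rw [← Nat.cast_max, ih]

lemma mival_eq (ns : List Nat) : mival ns = (maxN ns : Int) := by
  cases ns with
  | nil => simp [mival, maxN, PySem.List.max?]
  | cons c t =>
      unfold mival
      simp only [List.map_cons]
      rw [PySem.List.max?_id_cons, foldl_max_cast, Option.getD_some, maxN_cons, foldl_max_eq]

lemma go_eq_runsSplit : ∀ (l : List Char) (fuel : Nat) cur acc, l.length ≤ fuel →
    PySem.Chars.splitOn.go ['0'] fuel l cur acc = runsSplit l cur acc := by
  intro l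
  induction l with
  | nil =>
      intro fuel cur acc _
      cases fuel with
      | zero => rw [PySem.Chars.splitOn.go]; simp [runsSplit]
      | succ f => rw [PySem.Chars.splitOn.go]; simp [runsSplit]; omega
  | cons c t ih =>
      intro fuel cur acc h
      cases fuel with
      | zero => simp at h
      | succ f =>
          rw [PySem.Chars.splitOn.go]
          by_cases hc : c = '0'
          · simp only [runsSplit, hc, List.isPrefixOf]
            simp only [List.length_cons] at h
            simp [ih f _ _ (by omega)]
          · simp only [runsSplit, if_neg hc, List.isPrefixOf]
            simp only [List.length_cons] at h
            have : ('0' == c) = false := by simp [Ne.symm hc]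
            simp [this, ih f _ _ (by omega)]

lemma phi_fold (a0 a1 : List Char) : ∀ (idxs : List Int) (hl : List (List Char)) flag seq,
    ((List.foldl (ehStep a0 a1) (hl, flag, seq) idxs).1.map List.length,
     (List.foldl (ehStep a0 a1) (hl, flag, seq) idxs).2.2.length) =
    List.foldl stepN (hl.map List.length, seq.length)
      (idxs.map (fun i =>
        if PySem.List.pyGetD a0 i ' ' ≠ '-' ∧ PySem.List.pyGetD a1 i ' ' ≠ '-' then '1' else '0')) := by
  intro idxs
  induction idxs with
  | nil => intro hl flag seq; rfl
  | cons i t ih =>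
      intro hl flag seq
      simp only [List.map_cons, List.foldl_cons]
      by_cases h : PySem.List.pyGetD a0 i ' ' ≠ '-' ∧ PySem.List.pyGetD a1 i ' ' ≠ '-'
      · rw [if_pos h]
        have hstep : stepN (hl.map List.length, seq.length) '1' = (hl.map List.length, seq.length + 1) := by
          simp [stepN]
        rw [hstep]
        by_cases hf : flag = false
        · rw [show ehStep a0 a1 (hl, flag, seq) i
              = (hl, true, seq ++ [PySem.List.pyGetD a0 i ' ']) from by simp [ehStep, h, hf]]
          rw [ih]; simp
        · rw [show ehStep a0 a1 (hl, flag, seq) i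
              = (hl, flag, seq ++ [PySem.List.pyGetD a0 i ' ']) from by simp [ehStep, h, hf]]
          rw [ih]; simp
      · rw [if_neg h]
        rw [show ehStep a0 a1 (hl, flag, seq) i
            = ((if seq.length > 0 then hl ++ [seq] else hl), false, ([] : List Char)) from by
          simp [ehStep, h]]
        have hstep : stepN (hl.map List.length, seq.length) '0'
            = ((if seq.length > 0 then hl.map List.length ++ [seq.length] else hl.map List.length), 0) := by
          simp [stepN]
        rw [hstep, ih]
        by_cases hs : seq.length > 0 <;> simp [hs]

lemma finalN_fold : ∀ (cs : List Char) (hll : List Nat) (cur : Nat),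
    finalN (List.foldl stepN (hll, cur) cs) = ((max (maxN hll) (mrun cs cur) : Nat) : Int) := by
  intro cs
  induction cs with
  | nil =>
      intro hll cur
      simp only [List.foldl_nil, finalN, mrun]
      by_cases hc : cur > 0
      · rw [if_pos hc]
        by_cases hh : (hll ++ [cur]).length > 0
        · rw [if_pos hh, mival_eq, maxN_snoc]
        · simp at hh
      · rw [if_neg hc]
        have hcz : cur = 0 := by omega
        subst hcz
        by_cases hh : hll.length > 0
        · rw [if_pos hh, mival_eq]; simp
        · rw [if_neg hh]
          have : hll = [] := by cases hll <;> simp_all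
          subst this; simp [maxN]
  | cons c t ih =>
      intro hll cur
      simp only [List.foldl_cons]
      by_cases hc : c = '0'
      · rw [show stepN (hll, cur) c = ((if cur > 0 then hll ++ [cur] else hll), 0) from by
          simp [stepN, hc]]
        rw [ih]
        simp only [mrun, hc]
        by_cases hcur : cur > 0
        · rw [if_pos hcur, maxN_snoc]; push_cast; omega
        · rw [if_neg hcur]
          have : cur = 0 := by omega
          subst this; push_cast; omega
      · rw [show stepN (hll, cur) c = (hll, cur + 1) from by simp [stepN, hc]]
        rw [ih]
        simp [mrun, hc]

lemma runsSplit_max : ∀ (l : List Char) (cur : List Char) (acc : List (List Char)),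
    mival ((runsSplit l cur acc).map List.length) =
      ((max (maxN (acc.map List.length)) (mrun l cur.length) : Nat) : Int) := by
  intro l
  induction l with
  | nil =>
      intro cur acc
      simp only [runsSplit, mrun]
      rw [mival_eq]
      rw [List.map_reverse, maxN_reverse]
      simp only [List.map_cons, maxN_cons, List.length_reverse]
      push_cast; omega
  | cons c t ih =>
      intro cur acc
      simp only [runsSplit]
      by_cases hc : c = '0'
      · rw [if_pos hc, ih]
        simp only [List.map_cons, maxN_cons, List.length_reverse, List.length_nil, mrun, hc]
        push_cast; omega
      · rw [if_neg hc, ih]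
        simp [mrun, hc]

-- A's post-loop tail equals finalN of the length abstraction of its final state
lemma finalA_eq (st : List (List Char) × Bool × List Char) :
    (let hl := if st.2.2.length > 0 then st.1 ++ [st.2.2] else st.1
     let hll := hl.map (fun x => (x.length : Int))
     if hll.length > 0 then (PySem.List.max? hll (fun x => x)).getD 0 else 0)
    = finalN (st.1.map List.length, st.2.2.length) := by
  simp only [finalN, mival]
  by_cases h : st.2.2.length > 0 <;>
    simp [h, List.map_map, Function.comp_def]

-- ===== VERDICT (by name: the statement is the Claim_ definition above) =====
theorem extract_homology_spec : Claim_equal_extract_homology := by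
  intro alignment _ _
  unfold Spec_extract_homology extract_homology extract_homology_alt
  simp only []
  set a0 := ((PySem.List.pyGet? alignment 0).getD "").toList with ha0
  set a1 := ((PySem.List.pyGet? alignment 1).getD "").toList with ha1
  rw [finalA_eq]
  have hphi := phi_fold a0 a1 (PySem.List.pyRange 0 (a0.length : Int) 1) [] false []
  simp only [List.map_nil, List.length_nil] at hphi
  rw [hphi, finalN_fold]
  have hmask : (PySem.List.pyRange 0 (a0.length : Int) 1).map
      (fun i => if PySem.List.pyGetD a0 i ' ' ≠ '-' ∧ PySem.List.pyGetD a1 i ' ' ≠ '-' then '1' else '0')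
      = ehMask a0 a1 := rfl
  rw [hmask]
  unfold PySem.List.maxD PySem.Chars.splitOn
  rw [go_eq_runsSplit _ _ _ _ (by omega)]
  have hmm : (runsSplit (ehMask a0 a1) [] []).map (fun r => (r.length : Int))
      = ((runsSplit (ehMask a0 a1) [] []).map List.length).map (fun (n : Nat) => (n : Int)) := by
    rw [List.map_map]; rfl
  rw [hmm]
  have := runsSplit_max (ehMask a0 a1) [] []
  unfold mival at this
  rw [this]
  simp [maxN]
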